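-- pv_equiv track=rewrite | github.com/max-amb/nix-tree | decomposer.py | __finding_equals_signs
-- ===== SOURCE A (Python) =====
-- def __finding_equals_signs(file: list) -> list:
--     """Iterates through the file - split on spaces - to find the equals signs positions
--
--     Args:
--         file: list - The list containing the split configuration file
--
--     Returns:
--         locations: list - A list containing all the locations of the equals in the file
--
--     Note:
--         The tuples used in the locations list allow for the equals locations to be used when the file is split and
--         when it is not split
--     """
--     locations: list = []
--     char_location = 0
--     for phrase_itr in range(len(file)):
--         char_location += len(file[phrase_itr])
--         if file[phrase_itr] == "=":
--             locations.append((char_location, phrase_itr))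
--     return locations
-- ===== SOURCE B (Python) =====
-- def __finding_equals_signs(file: list) -> list:
--     """Two-phase version: first build the inclusive prefix-sum table of token
--     lengths, then collect (prefix[i], i) for exactly the indices holding "="."""
--     prefix: list = []
--     total = 0
--     for token in file:
--         total += len(token)
--         prefix.append(total)
--     return [(prefix[i], i) for i, token in enumerate(file) if token == "="]
-- ===== Notes on version B (the rewrite author's own statement) =====
-- stated objective: alternative
-- what changed: Replaces the single fused loop threading a running character counter past each '=' test with two separate phases: an inclusive prefix-sum table of token lengths built first, then a comprehension over enumerate(file) that emits (prefix[i], i) at the '=' indices.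
import Mathlib
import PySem

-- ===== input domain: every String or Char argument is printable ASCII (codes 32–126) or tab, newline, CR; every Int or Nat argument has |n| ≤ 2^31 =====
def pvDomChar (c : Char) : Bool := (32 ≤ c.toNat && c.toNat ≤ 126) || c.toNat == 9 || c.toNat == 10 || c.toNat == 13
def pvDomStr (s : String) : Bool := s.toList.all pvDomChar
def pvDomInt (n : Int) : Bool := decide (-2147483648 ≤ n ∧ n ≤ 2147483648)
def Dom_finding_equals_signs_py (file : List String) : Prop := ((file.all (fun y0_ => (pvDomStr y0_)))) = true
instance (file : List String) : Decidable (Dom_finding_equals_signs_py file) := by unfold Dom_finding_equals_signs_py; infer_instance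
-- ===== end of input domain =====

-- B separates A's fused loop into two phases (inclusive prefix-sum table of token lengths, then a
-- filtered pass over enumerate emitting (prefix[i], i) at the '=' indices); same O(n) cost.

-- ===== PORT A =====
-- loop 'for phrase_itr in range(len(file))': fold over pyRange, state = (locations, char_location);
-- pyGetD is exact here since the index is always in range.
def finding_equals_signs_py (file : List String) : List (Int × Int) :=
  ((PySem.List.pyRange 0 (PySem.List.len file) 1).foldl
    (fun (st : List (Int × Int) × Int) j =>
      let t := PySem.List.pyGetD file j ""
      let c := st.2 + PySem.Str.len t
      (if t = "=" then st.1 ++ [(c, j)] else st.1, c))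
    ([], 0)).1

-- ===== PORT B =====
-- phase 1: inclusive prefix sums of token lengths; phase 2: comprehension over enumerate(file).
-- pyGetD is exact: the index p.1 is always a valid index into prefix.
def finding_equals_signs_py_alt (file : List String) : List (Int × Int) :=
  let pref := (file.foldl
    (fun (st : List Int × Int) t =>
      let tot := st.2 + PySem.Str.len t
      (st.1 ++ [tot], tot)) ([], 0)).1
  ((PySem.List.enumerate file).filter (fun p => p.2 == "=")).map
    (fun p => (PySem.List.pyGetD pref p.1 0, p.1))

-- ===== PRECONDITION & SPEC =====
def Spec_finding_equals_signs_py (file : List String) (out : List (Int × Int)) : Prop := out = finding_equals_signs_py_alt file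
instance (file : List String) (out : List (Int × Int)) : Decidable (Spec_finding_equals_signs_py file out) := by unfold Spec_finding_equals_signs_py; infer_instance

-- ===== CLAIM (what is proved, stated in full; the proofs are below) =====
def Claim_equal_finding_equals_signs_py : Prop := ∀ (file : List String), Dom_finding_equals_signs_py file → Spec_finding_equals_signs_py file (finding_equals_signs_py file)

-- ===== LEMMAS AND PROOFS =====

-- common characterization: g ts c s = result on suffix ts, with c chars already consumed, first index s
def pvG : List String → Int → Int → List (Int × Int)
  | [], _, _ => []
  | t :: ts, c, s =>
      (if t = "=" then [(c + PySem.Str.len t, s)] else []) ++ pvG ts (c + PySem.Str.len t) (s + 1)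

-- inclusive prefix sums starting from c
def pvP : List String → Int → List Int
  | [], _ => []
  | t :: ts, c => (c + PySem.Str.len t) :: pvP ts (c + PySem.Str.len t)

theorem pvA_foldl (ts : List String) (s : Int) (acc : List (Int × Int)) (c : Int) :
    (PySem.List.enumerate ts s).foldl
      (fun (st : List (Int × Int) × Int) p =>
        let cNew := st.2 + PySem.Str.len p.2
        (if p.2 = "=" then st.1 ++ [(cNew, p.1)] else st.1, cNew))
      (acc, c)
      = (acc ++ pvG ts c s, c + (ts.map PySem.Str.len).sum) := by
  induction ts generalizing s acc c with
  | nil => simp [PySem.List.enumerate_nil, pvG]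
  | cons t ts ih =>
      simp only [PySem.List.enumerate_cons, List.foldl_cons, pvG]
      rw [ih]
      by_cases h : t = "="
      · refine Prod.ext ?_ ?_
        · simp [h, List.append_assoc]
        · simp; ring
      · refine Prod.ext ?_ ?_
        · simp [h]
        · simp; ring

theorem pvB_prefix_foldl (ts : List String) (acc : List Int) (c : Int) :
    ts.foldl (fun (st : List Int × Int) t =>
        let tot := st.2 + PySem.Str.len t
        (st.1 ++ [tot], tot)) (acc, c)
      = (acc ++ pvP ts c, c + (ts.map PySem.Str.len).sum) := by
  induction ts generalizing acc c with
  | nil => simp [pvP]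
  | cons t ts ih =>
      simp only [List.foldl_cons, pvP]
      rw [ih]
      simp [List.append_assoc]
      ring

theorem pvB_main (ts : List String) (pre0 : List Int) (c : Int) :
    ((PySem.List.enumerate ts (pre0.length : Int)).filter (fun p => p.2 == "=")).map
      (fun p => (PySem.List.pyGetD (pre0 ++ pvP ts c) p.1 0, p.1))
      = pvG ts c (pre0.length : Int) := by
  induction ts generalizing pre0 c with
  | nil => simp [PySem.List.enumerate_nil, pvG]
  | cons t ts ih =>
      have hidx : PySem.List.pyGetD (pre0 ++ pvP (t :: ts) c) (pre0.length : Int) 0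
          = c + PySem.Str.len t := by
        rw [PySem.List.pyGetD_natCast]
        simp [pvP, List.getD]
      have hrest := ih (pre0 ++ [c + PySem.Str.len t]) (c + PySem.Str.len t)
      have hlen : ((pre0 ++ [c + PySem.Str.len t]).length : Int) = (pre0.length : Int) + 1 := by
        simp
      have hlist : pre0 ++ [c + PySem.Str.len t] ++ pvP ts (c + PySem.Str.len t)
          = pre0 ++ pvP (t :: ts) c := by
        simp [pvP]
      rw [hlen, hlist] at hrest
      simp only [PySem.List.enumerate_cons, pvG]
      by_cases h : t = "="
      · subst h
        rw [List.filter_cons_of_pos (by simp), List.map_cons, hidx, hrest]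
        simp
      · rw [List.filter_cons_of_neg (by simp [h]), hrest]
        simp [h]

theorem pvA_eq (file : List String) : finding_equals_signs_py file = pvG file 0 0 := by
  unfold finding_equals_signs_py
  have := PySem.List.enumerate_eq_map_pyRange file ""
  rw [show (PySem.List.pyRange 0 (PySem.List.len file) 1).foldl
      (fun (st : List (Int × Int) × Int) j =>
        let t := PySem.List.pyGetD file j ""
        let c := st.2 + PySem.Str.len t
        (if t = "=" then st.1 ++ [(c, j)] else st.1, c)) ([], 0)
      = (PySem.List.enumerate file 0).foldl
        (fun (st : List (Int × Int) × Int) p =>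
          let cNew := st.2 + PySem.Str.len p.2
          (if p.2 = "=" then st.1 ++ [(cNew, p.1)] else st.1, cNew)) ([], 0) from by
    rw [this, List.foldl_map]]
  rw [pvA_foldl]
  simp

theorem pvB_eq (file : List String) : finding_equals_signs_py_alt file = pvG file 0 0 := by
  unfold finding_equals_signs_py_alt
  rw [pvB_prefix_foldl]
  have := pvB_main file [] 0
  simpa using this

-- ===== VERDICT (by name: the statement is the Claim_ definition above) =====
theorem finding_equals_signs_py_spec : Claim_equal_finding_equals_signs_py := by
  intro file _
  unfold Spec_finding_equals_signs_py
  rw [pvA_eq, pvB_eq]
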